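-- pv_equiv track=rewrite | github.com/phungthanhloan1996/ai-recon-agent | ai/llm_analyzer.py | _rule_vulnerability_analysis
-- ===== SOURCE A (Python) =====
-- from typing import Dict, List, Optional, Any, Tuple
--
-- def _rule_vulnerability_analysis(data: Dict) -> str:
--     """Rule-based vulnerability analysis"""
--     findings = []
--
--     # Analyze vulnerabilities
--     vulns = data.get('vulnerabilities', [])
--     critical_count = sum(1 for v in vulns if v.get('severity', '').lower() in ['critical', 'high'])
--     medium_count = sum(1 for v in vulns if v.get('severity', '').lower() == 'medium')
--     low_count = sum(1 for v in vulns if v.get('severity', '').lower() in ['low', 'informational'])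
--
--     findings.append(f"## Vulnerability Summary")
--     findings.append(f"- Critical/High: {critical_count}")
--     findings.append(f"- Medium: {medium_count}")
--     findings.append(f"- Low/Info: {low_count}")
--     findings.append(f"- Total: {len(vulns)}")
--
--     findings.append(f"\n## Critical Findings")
--     for v in vulns:
--         if v.get('severity', '').lower() in ['critical', 'high']:
--             findings.append(f"- **{v.get('name', 'Unknown')}**: {v.get('description', '')[:100]}")
--
--     findings.append(f"\n## Attack Vectors")
--     sqli_vulns = [v for v in vulns if 'sql' in v.get('name', '').lower()]
--     xss_vulns = [v for v in vulns if 'xss' in v.get('name', '').lower()]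
--     rce_vulns = [v for v in vulns if 'rce' in v.get('name', '').lower() or 'command' in v.get('name', '').lower()]
--
--     if sqli_vulns:
--         findings.append(f"- SQL Injection: {len(sqli_vulns)} vulnerabilities detected")
--     if xss_vulns:
--         findings.append(f"- Cross-Site Scripting: {len(xss_vulns)} vulnerabilities detected")
--     if rce_vulns:
--         findings.append(f"- Remote Code Execution: {len(rce_vulns)} vulnerabilities detected")
--
--     findings.append(f"\n## Risk Assessment")
--     if critical_count > 0:
--         findings.append("- **HIGH RISK**: Critical vulnerabilities require immediate attention")
--     elif medium_count > 0:
--         findings.append("- **MEDIUM RISK**: Medium severity issues should be addressed")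
--     else:
--         findings.append("- **LOW RISK**: Minor issues detected")
--
--     return "\n".join(findings)
-- ===== SOURCE B (Python) =====
-- def _rule_vulnerability_analysis(data):
--     """Rule-based vulnerability analysis (single pass over the vulnerabilities)"""
--     vulns = data.get('vulnerabilities', [])
--     crit = med = low = sqli = xss = rce = 0
--     crit_lines = []
--     for v in vulns:
--         sev = v.get('severity', '').lower()
--         if sev in ('critical', 'high'):
--             crit += 1
--             crit_lines.append(f"- **{v.get('name', 'Unknown')}**: {v.get('description', '')[:100]}")
--         elif sev == 'medium':
--             med += 1
--         elif sev in ('low', 'informational'):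
--             low += 1
--         name = v.get('name', '').lower()
--         if 'sql' in name:
--             sqli += 1
--         if 'xss' in name:
--             xss += 1
--         if 'rce' in name or 'command' in name:
--             rce += 1
--     parts = ["## Vulnerability Summary",
--              f"- Critical/High: {crit}",
--              f"- Medium: {med}",
--              f"- Low/Info: {low}",
--              f"- Total: {len(vulns)}",
--              "\n## Critical Findings",
--              *crit_lines,
--              "\n## Attack Vectors"]
--     if sqli:
--         parts.append(f"- SQL Injection: {sqli} vulnerabilities detected")
--     if xss:
--         parts.append(f"- Cross-Site Scripting: {xss} vulnerabilities detected")
--     if rce: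
--         parts.append(f"- Remote Code Execution: {rce} vulnerabilities detected")
--     parts.append("\n## Risk Assessment")
--     if crit > 0:
--         parts.append("- **HIGH RISK**: Critical vulnerabilities require immediate attention")
--     elif med > 0:
--         parts.append("- **MEDIUM RISK**: Medium severity issues should be addressed")
--     else:
--         parts.append("- **LOW RISK**: Minor issues detected")
--     return "\n".join(parts)
-- ===== Notes on version B (the rewrite author's own statement) =====
-- stated objective: simpler
-- what changed: A's six separate scans over the vulnerability list (three severity counts, a critical-findings pass, and three attack-vector list comprehensions) are replaced by one loop that classifies each vulnerability once, maintaining all counters and the critical-findings lines, with the report assembled afterwards from the accumulators.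
import Mathlib
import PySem

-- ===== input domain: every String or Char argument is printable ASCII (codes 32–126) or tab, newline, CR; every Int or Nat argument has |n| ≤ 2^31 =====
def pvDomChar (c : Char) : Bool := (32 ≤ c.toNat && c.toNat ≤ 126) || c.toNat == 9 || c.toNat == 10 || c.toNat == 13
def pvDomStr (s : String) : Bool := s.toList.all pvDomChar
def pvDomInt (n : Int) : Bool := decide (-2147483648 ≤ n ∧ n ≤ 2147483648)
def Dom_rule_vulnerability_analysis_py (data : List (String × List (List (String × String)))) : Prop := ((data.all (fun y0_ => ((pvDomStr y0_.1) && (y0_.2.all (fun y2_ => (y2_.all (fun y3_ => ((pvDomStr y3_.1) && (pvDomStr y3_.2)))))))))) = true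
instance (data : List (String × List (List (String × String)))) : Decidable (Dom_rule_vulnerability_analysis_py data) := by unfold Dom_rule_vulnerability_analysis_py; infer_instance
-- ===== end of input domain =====

-- B replaces A's six separate scans over the vulnerability list with ONE pass that maintains
-- all counters and the critical-findings lines, assembling the report afterwards (objective: simpler).

-- ===== PORT A =====
-- A-side helpers: v.get(k, dflt) on a vuln dict, and the lowered severity / name fields
def aGet (v : List (String × String)) (k dflt : String) : String :=
  PySem.Dict.getD (PySem.Dict.mk v) k dflt

def aSev (v : List (String × String)) : String := PySem.Str.lower (aGet v "severity" "")

def aName (v : List (String × String)) : String := PySem.Str.lower (aGet v "name" "")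

def rule_vulnerability_analysis_py (data : List (String × List (List (String × String)))) : String :=
  let vulns := PySem.Dict.getD (PySem.Dict.mk data) "vulnerabilities" []
  let critical_count : Int :=
    vulns.foldl (fun acc v => if ["critical", "high"].contains (aSev v) then acc + 1 else acc) 0
  let medium_count : Int :=
    vulns.foldl (fun acc v => if aSev v == "medium" then acc + 1 else acc) 0
  let low_count : Int :=
    vulns.foldl (fun acc v => if ["low", "informational"].contains (aSev v) then acc + 1 else acc) 0
  let findings : List String :=
    ["## Vulnerability Summary",
     "- Critical/High: " ++ PySem.Int.toStr critical_count,
     "- Medium: " ++ PySem.Int.toStr medium_count,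
     "- Low/Info: " ++ PySem.Int.toStr low_count,
     "- Total: " ++ PySem.Int.toStr (vulns.length : Int),
     "\n## Critical Findings"]
  let findings := vulns.foldl (fun acc v =>
      if ["critical", "high"].contains (aSev v) then
        acc ++ ["- **" ++ aGet v "name" "Unknown" ++ "**: " ++
                PySem.Str.slice (aGet v "description" "") none (some 100)]
      else acc) findings
  let findings := findings ++ ["\n## Attack Vectors"]
  let sqli_vulns := vulns.filter (fun v => PySem.Str.isIn "sql" (aName v))
  let xss_vulns := vulns.filter (fun v => PySem.Str.isIn "xss" (aName v))
  let rce_vulns := vulns.filter (fun v => PySem.Str.isIn "rce" (aName v) || PySem.Str.isIn "command" (aName v))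
  let findings := if !sqli_vulns.isEmpty then
      findings ++ ["- SQL Injection: " ++ PySem.Int.toStr (sqli_vulns.length : Int) ++ " vulnerabilities detected"]
    else findings
  let findings := if !xss_vulns.isEmpty then
      findings ++ ["- Cross-Site Scripting: " ++ PySem.Int.toStr (xss_vulns.length : Int) ++ " vulnerabilities detected"]
    else findings
  let findings := if !rce_vulns.isEmpty then
      findings ++ ["- Remote Code Execution: " ++ PySem.Int.toStr (rce_vulns.length : Int) ++ " vulnerabilities detected"]
    else findings
  let findings := findings ++ ["\n## Risk Assessment"]
  let findings := if critical_count > 0 then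
      findings ++ ["- **HIGH RISK**: Critical vulnerabilities require immediate attention"]
    else if medium_count > 0 then
      findings ++ ["- **MEDIUM RISK**: Medium severity issues should be addressed"]
    else
      findings ++ ["- **LOW RISK**: Minor issues detected"]
  PySem.Str.join "\n" findings

-- ===== PORT B =====
-- B-side helpers
def bGet (v : List (String × String)) (k dflt : String) : String :=
  PySem.Dict.getD (PySem.Dict.mk v) k dflt

def bSev (v : List (String × String)) : String := PySem.Str.lower (bGet v "severity" "")

def bName (v : List (String × String)) : String := PySem.Str.lower (bGet v "name" "")

def bCritLine (v : List (String × String)) : String :=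
  "- **" ++ bGet v "name" "Unknown" ++ "**: " ++ PySem.Str.slice (bGet v "description" "") none (some 100)

-- the single-pass loop state: (crit, med, low, crit_lines, sqli, xss, rce); bStep is the loop body
def bStep (s : Int × Int × Int × List String × Int × Int × Int) (v : List (String × String)) :
    Int × Int × Int × List String × Int × Int × Int :=
  ((if bSev v == "critical" || bSev v == "high" then s.1 + 1 else s.1),
   (if !(bSev v == "critical" || bSev v == "high") && bSev v == "medium" then s.2.1 + 1 else s.2.1),
   (if !(bSev v == "critical" || bSev v == "high") && !(bSev v == "medium") &&
       (bSev v == "low" || bSev v == "informational") then s.2.2.1 + 1 else s.2.2.1),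
   (if bSev v == "critical" || bSev v == "high" then s.2.2.2.1 ++ [bCritLine v] else s.2.2.2.1),
   (if PySem.Str.isIn "sql" (bName v) then s.2.2.2.2.1 + 1 else s.2.2.2.2.1),
   (if PySem.Str.isIn "xss" (bName v) then s.2.2.2.2.2.1 + 1 else s.2.2.2.2.2.1),
   (if PySem.Str.isIn "rce" (bName v) || PySem.Str.isIn "command" (bName v) then s.2.2.2.2.2.2 + 1 else s.2.2.2.2.2.2))

def rule_vulnerability_analysis_py_alt (data : List (String × List (List (String × String)))) : String :=
  let vulns := PySem.Dict.getD (PySem.Dict.mk data) "vulnerabilities" []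
  let st : Int × Int × Int × List String × Int × Int × Int :=
    vulns.foldl bStep ((0 : Int), (0 : Int), (0 : Int), ([] : List String), (0 : Int), (0 : Int), (0 : Int))
  let crit := st.1
  let med := st.2.1
  let low := st.2.2.1
  let crit_lines := st.2.2.2.1
  let sqli := st.2.2.2.2.1
  let xss := st.2.2.2.2.2.1
  let rce := st.2.2.2.2.2.2
  let parts : List String :=
    ["## Vulnerability Summary",
     "- Critical/High: " ++ PySem.Int.toStr crit,
     "- Medium: " ++ PySem.Int.toStr med,
     "- Low/Info: " ++ PySem.Int.toStr low,
     "- Total: " ++ PySem.Int.toStr (vulns.length : Int),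
     "\n## Critical Findings"] ++ crit_lines ++ ["\n## Attack Vectors"]
  let parts := if sqli != 0 then
      parts ++ ["- SQL Injection: " ++ PySem.Int.toStr sqli ++ " vulnerabilities detected"]
    else parts
  let parts := if xss != 0 then
      parts ++ ["- Cross-Site Scripting: " ++ PySem.Int.toStr xss ++ " vulnerabilities detected"]
    else parts
  let parts := if rce != 0 then
      parts ++ ["- Remote Code Execution: " ++ PySem.Int.toStr rce ++ " vulnerabilities detected"]
    else parts
  let parts := parts ++ ["\n## Risk Assessment"]
  let parts := parts ++
    [if crit > 0 then "- **HIGH RISK**: Critical vulnerabilities require immediate attention"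
     else if med > 0 then "- **MEDIUM RISK**: Medium severity issues should be addressed"
     else "- **LOW RISK**: Minor issues detected"]
  PySem.Str.join "\n" parts

-- ===== PRECONDITION & SPEC =====
def Spec_rule_vulnerability_analysis_py (data : List (String × List (List (String × String)))) (out : String) : Prop := out = rule_vulnerability_analysis_py_alt data
instance (data : List (String × List (List (String × String)))) (out : String) : Decidable (Spec_rule_vulnerability_analysis_py data out) := by unfold Spec_rule_vulnerability_analysis_py; infer_instance

-- ===== CLAIM (what is proved, stated in full; the proofs are below) =====
def Claim_equal_rule_vulnerability_analysis_py : Prop := ∀ (data : List (String × List (List (String × String)))), Dom_rule_vulnerability_analysis_py data → Spec_rule_vulnerability_analysis_py data (rule_vulnerability_analysis_py data)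

-- ===== LEMMAS AND PROOFS =====

lemma countP_crit (l : List (List (String × String))) :
    l.countP (fun v => ["critical", "high"].contains (bSev v)) =
    l.countP (fun v => bSev v == "critical" || bSev v == "high") := by
  apply List.countP_congr; intro v _; rw [Bool.eq_iff_iff]; simp

lemma filter_crit (l : List (List (String × String))) :
    l.filter (fun v => ["critical", "high"].contains (bSev v)) =
    l.filter (fun v => bSev v == "critical" || bSev v == "high") := by
  apply List.filter_congr; intro v _; rw [Bool.eq_iff_iff]; simp

lemma countP_med (l : List (List (String × String))) :
    l.countP (fun v => !(bSev v == "critical" || bSev v == "high") && (bSev v == "medium")) =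
    l.countP (fun v => bSev v == "medium") := by
  apply List.countP_congr; intro v _
  by_cases h : bSev v = "medium" <;> simp [h]

lemma countP_low (l : List (List (String × String))) :
    l.countP (fun v => !(bSev v == "critical" || bSev v == "high") && !(bSev v == "medium") &&
        (bSev v == "low" || bSev v == "informational")) =
    l.countP (fun v => ["low", "informational"].contains (bSev v)) := by
  apply List.countP_congr; intro v _
  by_cases h : bSev v = "low"
  · simp [h]
  · by_cases h2 : bSev v = "informational" <;> simp [h, h2]

lemma isEmpty_filter_eq {A : Type} (l : List A) (p : A → Bool) :
    (!(l.filter p).isEmpty) = ((((l.countP p : Int)) != 0)) := by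
  rw [Bool.eq_iff_iff]
  simp [List.isEmpty_eq_false_iff, List.countP_eq_length_filter]

lemma bfold (l : List (List (String × String))) (c m lo : Int) (cl : List String) (s x r : Int) :
    l.foldl bStep (c, m, lo, cl, s, x, r) =
      (c + (l.countP (fun v => bSev v == "critical" || bSev v == "high") : Int),
       m + (l.countP (fun v => !(bSev v == "critical" || bSev v == "high") && bSev v == "medium") : Int),
       lo + (l.countP (fun v => !(bSev v == "critical" || bSev v == "high") && !(bSev v == "medium") &&
            (bSev v == "low" || bSev v == "informational")) : Int),
       cl ++ (l.filter (fun v => bSev v == "critical" || bSev v == "high")).map bCritLine,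
       s + (l.countP (fun v => PySem.Str.isIn "sql" (bName v)) : Int),
       x + (l.countP (fun v => PySem.Str.isIn "xss" (bName v)) : Int),
       r + (l.countP (fun v => PySem.Str.isIn "rce" (bName v) || PySem.Str.isIn "command" (bName v)) : Int)) := by
  induction l generalizing c m lo cl s x r with
  | nil => simp
  | cons v t ih =>
    rw [List.foldl_cons, ih]
    simp only [bStep, List.countP_cons, List.filter_cons, Prod.mk.injEq]
    refine ⟨?_, ?_, ?_, ?_, ?_, ?_, ?_⟩ <;> split_ifs <;> simp_all <;> ring

theorem main_eq (data : List (String × List (List (String × String)))) :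
    rule_vulnerability_analysis_py data = rule_vulnerability_analysis_py_alt data := by
  unfold rule_vulnerability_analysis_py rule_vulnerability_analysis_py_alt
  rw [show aSev = bSev from rfl, show aName = bName from rfl, show aGet = bGet from rfl]
  simp only [bfold, PySem.List.foldl_if_add_one, PySem.List.foldl_append_if, zero_add,
    List.nil_append, countP_crit, filter_crit, countP_med, countP_low,
    ← List.countP_eq_length_filter, isEmpty_filter_eq]
  rw [show bCritLine = (fun x => "- **" ++ bGet x "name" "Unknown" ++ "**: " ++
        PySem.Str.slice (bGet x "description" "") none (some 100)) from rfl]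
  split_ifs <;> rfl

-- ===== VERDICT (by name: the statement is the Claim_ definition above) =====
theorem rule_vulnerability_analysis_py_spec : Claim_equal_rule_vulnerability_analysis_py := by
  intro data _
  exact main_eq data
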